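-- pv_equiv track=rewrite | github.com/rymo1354/crystal_motifs | helpers.py | dummy_dct
-- ===== SOURCE A (Python) =====
-- def dummy_dct(formulas):
--     formulas_dct = {}
--     count = 0
--     for formula in formulas:
--         if formula in formulas_dct:
--             pass
--         else:
--             formulas_dct[formula] = 'Z%s' % str(count)
--             count += 1
--     return formulas_dct
-- ===== SOURCE B (Python) =====
-- def dummy_dct(formulas):
--     # Stateless: a formula is labelled at its first occurrence, and its label
--     # index is the number of distinct formulas strictly before that position.
--     return {f: 'Z%s' % len(set(formulas[:i]))
--             for i, f in enumerate(formulas)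
--             if f not in formulas[:i]}
-- ===== Notes on version B (the rewrite author's own statement) =====
-- stated objective: alternative
-- what changed: Replaces A's stateful loop (accumulating dict + manual counter) by a stateless dict comprehension that keeps each first occurrence and computes its label index independently as the number of distinct formulas in the prefix before it (len(set(formulas[:i]))).
import Mathlib
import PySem

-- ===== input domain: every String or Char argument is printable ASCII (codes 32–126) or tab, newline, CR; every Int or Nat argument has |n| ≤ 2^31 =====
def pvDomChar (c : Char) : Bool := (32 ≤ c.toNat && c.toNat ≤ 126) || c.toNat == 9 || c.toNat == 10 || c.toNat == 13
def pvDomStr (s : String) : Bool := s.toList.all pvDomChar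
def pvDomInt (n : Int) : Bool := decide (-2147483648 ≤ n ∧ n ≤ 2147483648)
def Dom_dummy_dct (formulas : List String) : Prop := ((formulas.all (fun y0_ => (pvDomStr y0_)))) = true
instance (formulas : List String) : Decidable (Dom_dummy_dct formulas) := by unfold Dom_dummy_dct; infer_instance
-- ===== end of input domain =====

-- B replaces A's stateful loop (accumulating dict + counter) by a stateless dict
-- comprehension: each first occurrence is labelled by the number of distinct
-- formulas in the prefix before it (objective: alternative algorithm; B is O(n^2)).


-- ===== PORT A =====
-- A: one loop over formulas maintaining a dict and a manual counter;
-- 'Z%s' % str(count) is "Z" ++ PySem.Int.toStr count.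
def dummy_dct (formulas : List String) : List (String × String) :=
  (formulas.foldl
    (fun (st : PySem.Dict String String × Int) formula =>
      if st.1.contains formula then st
      else (st.1.insert formula ("Z" ++ PySem.Int.toStr st.2), st.2 + 1))
    (PySem.Dict.empty, 0)).1.items

-- ===== PORT B =====
-- B: a dict comprehension over enumerate(formulas); a pair is kept iff f is not
-- in the prefix formulas[:i], and its label index is len(set(formulas[:i])).
def dummy_dct_alt (formulas : List String) : List (String × String) :=
  ((PySem.List.enumerate formulas 0).foldl
    (fun (d : PySem.Dict String String) p =>
      if (PySem.List.slice formulas none (some p.1)).contains p.2 then d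
      else d.insert p.2
        ("Z" ++ PySem.Int.toStr
          (PySem.Set.len (PySem.Set.ofList (PySem.List.slice formulas none (some p.1))))))
    PySem.Dict.empty).items

-- ===== PRECONDITION & SPEC =====
def Spec_dummy_dct (formulas : List String) (out : List (String × String)) : Prop := out = dummy_dct_alt formulas
instance (formulas : List String) (out : List (String × String)) : Decidable (Spec_dummy_dct formulas out) := by unfold Spec_dummy_dct; infer_instance

-- ===== CLAIM (what is proved, stated in full; the proofs are below) =====
def Claim_equal_dummy_dct : Prop := ∀ (formulas : List String), Dom_dummy_dct formulas → Spec_dummy_dct formulas (dummy_dct formulas)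

-- ===== LEMMAS AND PROOFS =====

-- The common reference value: the unique list u labelled in order.
def pvLab (u : List String) : List (String × String) :=
  (PySem.List.enumerate u 0).map (fun p => (p.2, "Z" ++ PySem.Int.toStr p.1))

-- The dict labelled from u contains f iff u does.
theorem pvLab_contains (u : List String) (f : String) :
    (PySem.Dict.mk (pvLab u)).contains f = u.contains f := by
  simp only [PySem.Dict.contains, pvLab, List.any_map, Function.comp_def]
  rw [Bool.eq_iff_iff]
  simp [List.any_eq_true, PySem.List.getElem_enumerate, List.mem_iff_getElem, Prod.ext_iff]

-- Labelling u ++ [f] extends the labelling of u by one pair keyed u.length.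
theorem pvLab_append (u : List String) (f : String) :
    pvLab (u ++ [f]) = pvLab u ++ [(f, "Z" ++ PySem.Int.toStr u.length)] := by
  simp [pvLab, PySem.List.enumerate_append, PySem.List.enumerate_cons,
    PySem.List.enumerate_nil]

-- A-side loop invariant: A's fold started from the dict labelled from the
-- unique list u (with count = u.length) computes the labelling of Set-folding
-- fs onto u.
theorem pvLoop (fs : List String) (u : List String) :
    (fs.foldl
      (fun (st : PySem.Dict String String × Int) formula =>
        if st.1.contains formula then st
        else (st.1.insert formula ("Z" ++ PySem.Int.toStr st.2), st.2 + 1))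
      (PySem.Dict.mk (pvLab u), (u.length : Int))).1.items
    = pvLab (fs.foldl PySem.Set.add u) := by
  induction fs generalizing u with
  | nil => simp [pvLab]
  | cons f fs ih =>
    simp only [List.foldl_cons]
    by_cases h : u.contains f
    · rw [if_pos (by rw [pvLab_contains]; exact h)]
      have hm : f ∈ u := List.mem_of_elem_eq_true h
      have : PySem.Set.add u f = u := by
        simp [PySem.Set.add, PySem.Set.contains, hm]
      rw [this, ih]
    · have hm : f ∉ u := fun m => h (List.elem_eq_true_of_mem m)
      rw [if_neg (by rw [pvLab_contains]; simpa using h)]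
      have hins : (PySem.Dict.mk (pvLab u)).insert f ("Z" ++ PySem.Int.toStr (u.length : Int))
          = PySem.Dict.mk (pvLab (u ++ [f])) := by
        rw [PySem.Dict.insert, if_neg (by rw [pvLab_contains]; simpa using h), pvLab_append]
      have hadd : PySem.Set.add u f = u ++ [f] := by
        simp [PySem.Set.add, PySem.Set.contains, hm]
      rw [hins, hadd]
      have := ih (u ++ [f])
      simpa [Nat.cast_add, add_comm] using this

-- B-side: the comprehension's fold, as a function of the scanned list.
def pvBFold (formulas : List String) : PySem.Dict String String :=
  (PySem.List.enumerate formulas 0).foldl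
    (fun (d : PySem.Dict String String) p =>
      if (PySem.List.slice formulas none (some p.1)).contains p.2 then d
      else d.insert p.2
        ("Z" ++ PySem.Int.toStr
          (PySem.Set.len (PySem.Set.ofList (PySem.List.slice formulas none (some p.1))))))
    PySem.Dict.empty

-- B-side invariant, by induction on the list from the right.
theorem pvBFold_eq (formulas : List String) :
    pvBFold formulas = PySem.Dict.mk (pvLab (PySem.Set.ofList formulas)) := by
  induction formulas using List.reverseRecOn with
  | nil => simp [pvBFold, PySem.List.enumerate_nil, PySem.Set.ofList, PySem.Set.empty,
      PySem.Dict.empty, pvLab]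
  | append_singleton xs x ih =>
    have hcong :
        (PySem.List.enumerate (xs ++ [x]) 0).foldl
          (fun (d : PySem.Dict String String) p =>
            if (PySem.List.slice (xs ++ [x]) none (some p.1)).contains p.2 then d
            else d.insert p.2
              ("Z" ++ PySem.Int.toStr
                (PySem.Set.len (PySem.Set.ofList (PySem.List.slice (xs ++ [x]) none (some p.1))))))
          PySem.Dict.empty
        = List.foldl
          (fun (d : PySem.Dict String String) p =>
            if (PySem.List.slice (xs ++ [x]) none (some p.1)).contains p.2 then d
            else d.insert p.2
              ("Z" ++ PySem.Int.toStr
                (PySem.Set.len (PySem.Set.ofList (PySem.List.slice (xs ++ [x]) none (some p.1))))))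
          (pvBFold xs) [((xs.length : Int), x)] := by
      rw [PySem.List.enumerate_append, List.foldl_append]
      congr 1
      case e_init =>
        unfold pvBFold
        apply PySem.List.foldl_congr_mem
        intro acc p hp
        rcases (PySem.List.mem_enumerate_iff xs 0 p).1 hp with ⟨k, hk, rfl⟩
        have hsl : PySem.List.slice (xs ++ [x]) none (some ((0 : Int) + (k : Int)))
            = PySem.List.slice xs none (some ((0 : Int) + (k : Int))) := by
          have h1 : ((0 : Int) + (k : Int)) = ((k : Nat) : Int) := by simp
          rw [h1, PySem.List.slice_to_natCast, PySem.List.slice_to_natCast,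
            List.take_append_of_le_length (Nat.le_of_lt hk)]
        rw [hsl]
      next => simp [PySem.List.enumerate_cons, PySem.List.enumerate_nil]
    have hslast : PySem.List.slice (xs ++ [x]) none (some ((xs.length : Nat) : Int)) = xs := by
      rw [PySem.List.slice_to_natCast, List.take_left]
    by_cases h : xs.contains x
    · have hm : x ∈ xs := List.mem_of_elem_eq_true h
      have hadd : PySem.Set.add (PySem.Set.ofList xs) x = PySem.Set.ofList xs := by
        simp [PySem.Set.add, PySem.Set.contains, (PySem.Set.mem_ofList xs x).2 hm]
      unfold pvBFold
      rw [hcong]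
      simp only [List.foldl_cons, List.foldl_nil, hslast]
      rw [if_pos h, ih, PySem.Set.ofList_append_singleton]
      · rw [hadd]
    · have hm : x ∉ xs := fun m => h (List.elem_eq_true_of_mem m)
      have hmo : x ∉ PySem.Set.ofList xs := fun m => hm ((PySem.Set.mem_ofList xs x).1 m)
      have hadd : PySem.Set.add (PySem.Set.ofList xs) x = PySem.Set.ofList xs ++ [x] := by
        simp [PySem.Set.add, PySem.Set.contains, hmo]
      unfold pvBFold
      rw [hcong]
      simp only [List.foldl_cons, List.foldl_nil, hslast]
      rw [if_neg h, ih]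
      rw [PySem.Dict.insert,
        if_neg (by rw [pvLab_contains]; simpa using hmo),
        PySem.Set.ofList_append_singleton, hadd, pvLab_append]
      rfl

-- ===== VERDICT (by name: the statement is the Claim_ definition above) =====
theorem dummy_dct_spec : Claim_equal_dummy_dct := by
  intro formulas _
  show dummy_dct formulas = dummy_dct_alt formulas
  have hA := pvLoop formulas []
  have hB : dummy_dct_alt formulas = pvLab (PySem.Set.ofList formulas) := by
    show (pvBFold formulas).items = _
    rw [pvBFold_eq]
  rw [hB]
  simpa [dummy_dct, PySem.Set.ofList, PySem.Set.empty, PySem.Dict.empty, pvLab] using hA
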